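-- pv_equiv track=rewrite | github.com/Vitor-HenriqueAS/Graph | Pages/Cadastro_Login/Cadastro.py | verifica_email
-- ===== SOURCE A (Python) =====
-- def verifica_email(email_cliente):
--     letras = [chr(x) for x in range(ord('a'), ord('z') + 1)]
--     numeros = [chr(x) for x in range(ord('1'), ord('9') + 1)]
--     ponto_traço = [chr(x) for x in range(ord('-'), ord('.') + 1)]
--     underline = [chr(x) for x in range(ord('_'), ord('`'))]
--     #SIMBOLOS PERMITIDOS
--     simbolos = [i for i in email_cliente if i not in letras and i not in numeros \
--                 and  i not in ponto_traço and i not in underline]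
--     if simbolos == ['@']:
--         return True
--     else:
--         return False
-- ===== SOURCE B (Python) =====
-- def verifica_email(email_cliente):
--     allowed = "abcdefghijklmnopqrstuvwxyz123456789-._"
--     parts = email_cliente.split("@")
--     if len(parts) != 2:
--         return False
--     return all(c in allowed for c in parts[0] + parts[1])
-- ===== Notes on version B (the rewrite author's own statement) =====
-- stated objective: faster
-- what changed: Instead of building four generated alphabet lists and filtering the email's disallowed characters into an ordered list compared against the singleton at-sign list, B splits the email on the at-sign and checks that exactly two parts result and that every character of the two parts belongs to one allowed alphabet string.
import Mathlib
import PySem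

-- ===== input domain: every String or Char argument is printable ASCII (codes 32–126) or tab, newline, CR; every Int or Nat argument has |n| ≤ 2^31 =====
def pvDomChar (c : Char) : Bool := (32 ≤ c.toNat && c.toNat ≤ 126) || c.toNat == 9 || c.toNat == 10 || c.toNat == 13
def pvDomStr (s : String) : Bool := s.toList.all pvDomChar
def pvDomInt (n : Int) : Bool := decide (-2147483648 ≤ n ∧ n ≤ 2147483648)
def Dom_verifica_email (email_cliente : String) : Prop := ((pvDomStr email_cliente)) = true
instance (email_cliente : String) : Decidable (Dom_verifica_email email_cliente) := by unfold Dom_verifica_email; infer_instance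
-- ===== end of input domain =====

-- B splits the email on '@' and checks that exactly two parts result and that both
-- parts consist only of the allowed characters — split-and-validate instead of
-- filter-and-compare; measurably faster by a constant factor (C-level split).

-- ===== PORT A =====
def verifica_email (email_cliente : String) : Bool :=
  let letras := (PySem.List.pyRange 97 (122 + 1) 1).map (fun x => Char.ofNat x.toNat)
  let numeros := (PySem.List.pyRange 49 (57 + 1) 1).map (fun x => Char.ofNat x.toNat)
  let ponto_traco := (PySem.List.pyRange 45 (46 + 1) 1).map (fun x => Char.ofNat x.toNat)
  let underline := (PySem.List.pyRange 95 96 1).map (fun x => Char.ofNat x.toNat)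
  let simbolos := email_cliente.toList.filter (fun i =>
    !(letras.contains i) && !(numeros.contains i) && !(ponto_traco.contains i)
      && !(underline.contains i))
  decide (simbolos = ['@'])

-- ===== PORT B =====
def verifica_email_alt (email_cliente : String) : Bool :=
  let allowed := "abcdefghijklmnopqrstuvwxyz123456789-._"
  let parts := (PySem.Str.split? email_cliente "@").getD []
  if parts.length ≠ 2 then false
  else
    (((PySem.List.pyGet? parts 0).getD "") ++ ((PySem.List.pyGet? parts 1).getD "")).toList.all
      (fun c => allowed.toList.contains c)

-- ===== PRECONDITION & SPEC =====
def Spec_verifica_email (email_cliente : String) (out : Bool) : Prop := out = verifica_email_alt email_cliente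
instance (email_cliente : String) (out : Bool) : Decidable (Spec_verifica_email email_cliente out) := by unfold Spec_verifica_email; infer_instance

-- ===== CLAIM =====
def Claim_equal_verifica_email : Prop := ∀ (email_cliente : String), Dom_verifica_email email_cliente → Spec_verifica_email email_cliente (verifica_email email_cliente)

-- ===== LEMMAS AND PROOFS =====

def pvAllowed : List Char := "abcdefghijklmnopqrstuvwxyz123456789-._".toList

-- simple structural model of splitting on '@'
def pvSplit : List Char → List (List Char)
  | [] => [[]]
  | c :: t => if c = '@' then [] :: pvSplit t else (pvSplit t).modifyHead (c :: ·)

theorem pvSplit_ne_nil (l : List Char) : pvSplit l ≠ [] := by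
  induction l with
  | nil => simp [pvSplit]
  | cons c t ih =>
    simp only [pvSplit]
    split_ifs
    · simp
    · cases h : pvSplit t with
      | nil => exact absurd h ih
      | cons a b => simp [List.modifyHead]

theorem pvSplit_length (l : List Char) : (pvSplit l).length = l.count '@' + 1 := by
  induction l with
  | nil => simp [pvSplit]
  | cons c t ih =>
    simp only [pvSplit]
    split_ifs with h
    · subst h; simp [ih]
    · simpa [List.count_cons, h] using ih

theorem pvSplit_flatten (l : List Char) :
    (pvSplit l).flatten = l.filter (fun c => !(c == '@')) := by
  induction l with
  | nil => simp [pvSplit]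
  | cons c t ih =>
    simp only [pvSplit]
    split_ifs with h
    · subst h; simpa using ih
    · cases hs : pvSplit t with
      | nil => exact absurd hs (pvSplit_ne_nil t)
      | cons a b =>
        rw [hs] at ih
        simp [List.modifyHead, h, ← ih]

theorem pvGo_eq (l : List Char) : ∀ (fuel : Nat) (cur : List Char) (acc : List (List Char)),
    l.length ≤ fuel →
    PySem.Chars.splitOn.go ['@'] fuel l cur acc
      = acc.reverse ++ (pvSplit l).modifyHead (cur.reverse ++ ·) := by
  induction l with
  | nil =>
    intro fuel cur acc _
    cases fuel with
    | zero => rw [PySem.Chars.splitOn.go]; simp [pvSplit]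
    | succ n => rw [PySem.Chars.splitOn.go]; simp [pvSplit]; omega
  | cons c t ih =>
    intro fuel cur acc hle
    cases fuel with
    | zero => simp at hle
    | succ n =>
      rw [PySem.Chars.splitOn.go]
      simp only [List.isPrefixOf, Bool.and_true, List.length_nil, List.length_cons,
        Nat.zero_add, List.drop_succ_cons, List.drop_zero]
      by_cases h : c = '@'
      · subst h
        rw [if_pos (by simp)]
        rw [ih n [] (cur.reverse :: acc) (by simp at hle; omega)]
        simp only [pvSplit, List.reverse_cons, List.append_assoc, List.singleton_append]
        cases pvSplit t <;> simp [List.modifyHead]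
      · have hb : ('@' == c) = false := by simp [BEq.comm, h]
        rw [if_neg (by simp [hb])]
        rw [ih n (c :: cur) acc (by simp at hle; omega)]
        simp only [pvSplit, if_neg h, List.modifyHead_modifyHead]
        simp [Function.comp_def]

theorem pvSplitOn_eq (l : List Char) : PySem.Chars.splitOn l ['@'] = pvSplit l := by
  rw [PySem.Chars.splitOn, pvGo_eq l (l.length + 1) [] [] (by omega)]
  cases h : pvSplit l with
  | nil => exact absurd h (pvSplit_ne_nil l)
  | cons a b => simp [List.modifyHead]

-- A's four membership tests amount to one test against the allowed alphabet.
theorem pvPred_eq (c : Char) :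
    (!(((PySem.List.pyRange 97 (122 + 1) 1).map (fun x => Char.ofNat x.toNat)).contains c)
      && !(((PySem.List.pyRange 49 (57 + 1) 1).map (fun x => Char.ofNat x.toNat)).contains c)
      && !(((PySem.List.pyRange 45 (46 + 1) 1).map (fun x => Char.ofNat x.toNat)).contains c)
      && !(((PySem.List.pyRange 95 96 1).map (fun x => Char.ofNat x.toNat)).contains c))
    = !(pvAllowed.contains c) := by
  have h1 : (PySem.List.pyRange 97 (122 + 1) 1).map (fun x => Char.ofNat x.toNat)
      = "abcdefghijklmnopqrstuvwxyz".toList := by decide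
  have h2 : (PySem.List.pyRange 49 (57 + 1) 1).map (fun x => Char.ofNat x.toNat)
      = "123456789".toList := by decide
  have h3 : (PySem.List.pyRange 45 (46 + 1) 1).map (fun x => Char.ofNat x.toNat)
      = "-.".toList := by decide
  have h4 : (PySem.List.pyRange 95 96 1).map (fun x => Char.ofNat x.toNat)
      = "_".toList := by decide
  have hsplit : pvAllowed
      = "abcdefghijklmnopqrstuvwxyz".toList ++ "123456789".toList ++ "-.".toList ++ "_".toList := by
    decide
  rw [h1, h2, h3, h4, hsplit]
  rw [Bool.eq_iff_iff]
  simp [List.contains_eq_mem, and_assoc]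

-- core characterisation: A's filter result is ['@'] iff '@' occurs once and
-- every other character is allowed
theorem pvMain (l : List Char) :
    (l.filter (fun c => !(pvAllowed.contains c)) = ['@'])
    ↔ (l.count '@' = 1
        ∧ ∀ c ∈ l.filter (fun c => !(c == '@')), pvAllowed.contains c = true) := by
  have hbad : (!(pvAllowed.contains '@')) = true := by decide
  constructor
  · intro h
    have hsub : ∀ c, c ∈ l → ¬ (pvAllowed.contains c = true) → c = '@' := by
      intro c hc hna
      have hfalse : pvAllowed.contains c = false := by
        revert hna; cases pvAllowed.contains c <;> simp
      have hnm : c ∉ pvAllowed := by simpa using hfalse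
      have : c ∈ l.filter (fun c => !(pvAllowed.contains c)) := by
        simp [List.mem_filter, hc, hnm]
      rw [h] at this; simpa using this
    refine ⟨?_, ?_⟩
    · have hcf := List.count_filter (p := fun c => !(pvAllowed.contains c))
        (a := '@') (l := l) hbad
      rw [h] at hcf
      simpa using hcf.symm
    · intro c hc
      rw [List.mem_filter] at hc
      by_contra hna
      have := hsub c hc.1 hna
      subst this
      simpa using hc.2
  · rintro ⟨hcnt, hok⟩
    have hall : ∀ c ∈ l.filter (fun c => !(pvAllowed.contains c)), c = '@' := by
      intro c hc
      rw [List.mem_filter] at hc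
      by_contra hne
      have : c ∈ l.filter (fun c => !(c == '@')) := by
        simp [List.mem_filter, hc.1, hne]
      have h2 : c ∈ pvAllowed := by simpa using hok c this
      have h3 : c ∉ pvAllowed := by simpa using hc.2
      exact h3 h2
    have hc1 : (l.filter (fun c => !(pvAllowed.contains c))).count '@' = 1 := by
      rw [List.count_filter (p := fun c => !(pvAllowed.contains c)) hbad]
      exact hcnt
    have hrep := List.eq_replicate_of_mem (a := '@') hall
    rw [hrep]
    have hlen : (l.filter (fun c => !(pvAllowed.contains c))).length = 1 := by
      rw [hrep] at hc1; simpa using hc1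
    rw [hlen]; rfl

-- ===== VERDICT =====
theorem verifica_email_spec : Claim_equal_verifica_email := by
  intro s _
  unfold Spec_verifica_email verifica_email verifica_email_alt
  simp only []
  rw [List.filter_congr (fun c _ => pvPred_eq c)]
  have h1 : ("@" : String).toList = ['@'] := by decide
  rw [PySem.Str.split?, PySem.Chars.split?, h1]
  simp only [List.isEmpty_cons, Bool.false_eq_true, if_false, Option.map_some, Option.getD_some]
  rw [pvSplitOn_eq]
  set l := s.toList with hl
  rw [Bool.eq_iff_iff]
  rw [decide_eq_true_eq, pvMain l]
  have hlen := pvSplit_length l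
  have hflat := pvSplit_flatten l
  by_cases hc : l.count '@' = 1
  · have h2 : ((pvSplit l).map String.ofList).length = 2 := by simp [hlen, hc]
    rw [if_neg (by simp [h2])]
    cases hs : pvSplit l with
    | nil => exact absurd hs (pvSplit_ne_nil l)
    | cons a b =>
      cases b with
      | nil => rw [hs] at hlen; simp at hlen; omega
      | cons a2 b2 =>
        cases b2 with
        | cons a3 b3 => rw [hs] at hlen; simp [hc] at hlen
        | nil =>
          rw [hs] at hflat
          simp only [List.flatten_cons, List.flatten_nil, List.append_nil] at hflat
          simp only [List.map_cons, List.map_nil]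
          rw [show PySem.List.pyGet? [String.ofList a, String.ofList a2] 0
                = some (String.ofList a) from by simp [PySem.List.pyGet?, PySem.List.pyIdx?],
              show PySem.List.pyGet? [String.ofList a, String.ofList a2] 1
                = some (String.ofList a2) from by simp [PySem.List.pyGet?, PySem.List.pyIdx?]]
          simp only [Option.getD_some]
          constructor
          · rintro ⟨_, hok⟩
            simp only [List.all_eq_true]
            intro c hcmem
            apply hok
            rw [← hflat]
            have : (String.ofList a ++ String.ofList a2).toList = a ++ a2 := by
              simp
            rw [this] at hcmem
            simpa using hcmem
          · intro hall
            refine ⟨hc, ?_⟩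
            intro c hcmem
            rw [← hflat] at hcmem
            simp only [List.all_eq_true] at hall
            apply hall
            have : (String.ofList a ++ String.ofList a2).toList = a ++ a2 := by
              simp
            rw [this]
            simpa using hcmem
  · have h2 : ¬ (pvSplit l).length = 2 := by rw [hlen]; omega
    rw [if_pos (by simp [h2])]
    simp only [Bool.false_eq_true, iff_false, not_and]
    intro h; exact absurd h hc
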